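-- pv_equiv track=rewrite | github.com/Bonnieliuliu/LeetCodePlayGround | FromLeetCode/Simple/EndsWith1Bit.py | EndsWith1Bit
-- ===== SOURCE A (Python) =====
-- def EndsWith1Bit(given_list):
--     i = 0
--     while i <= len(given_list)-2:
--         if given_list[i] == 1:
--             i += 2
--         else:
--             i += 1
--     if i == len(given_list) - 1:
--         return True
--     else:
--         return False
-- ===== SOURCE B (Python) =====
-- def EndsWith1Bit(given_list):
--     if not given_list:
--         return False
--     run = 0
--     for x in reversed(given_list[:-1]):
--         if x != 1:
--             break
--         run += 1
--     return run % 2 == 0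
-- ===== Notes on version B (the rewrite author's own statement) =====
-- stated objective: faster
-- what changed: Replaces A's forward greedy index parse (step 2 on a 1, else 1, then test the landing index) by a single backward scan that counts the run of 1s immediately before the last element and returns whether that run length is even; it stops at the first non-1, so it touches only the trailing run.
import Mathlib
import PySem

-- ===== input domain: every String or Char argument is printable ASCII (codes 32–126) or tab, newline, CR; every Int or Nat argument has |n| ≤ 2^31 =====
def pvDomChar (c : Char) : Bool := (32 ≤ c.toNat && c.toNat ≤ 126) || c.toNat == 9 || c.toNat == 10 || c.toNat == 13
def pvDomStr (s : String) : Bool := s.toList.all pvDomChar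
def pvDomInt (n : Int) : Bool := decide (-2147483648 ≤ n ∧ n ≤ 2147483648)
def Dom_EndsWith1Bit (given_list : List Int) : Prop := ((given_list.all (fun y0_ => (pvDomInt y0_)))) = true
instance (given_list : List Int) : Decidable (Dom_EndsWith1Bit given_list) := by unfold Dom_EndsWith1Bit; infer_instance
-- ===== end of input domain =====

-- B replaces A's forward greedy index parse by a backward scan that returns the
-- parity of the run of 1s just before the last element (objective: alternative).

-- ===== PORT A =====
-- the while loop of A; the index i is always in range (0 ≤ i ≤ len-2) when
-- given_list[i] is read, so pyGet? returns some there and getD 0 is exact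
def pvALoop (given_list : List Int) (i : Int) : Int :=
  if i ≤ (given_list.length : Int) - 2 then
    if (PySem.List.pyGet? given_list i).getD 0 = 1 then
      pvALoop given_list (i + 2)
    else
      pvALoop given_list (i + 1)
  else i
termination_by ((given_list.length : Int) - i).toNat
decreasing_by all_goals omega

def EndsWith1Bit (given_list : List Int) : Bool :=
  if pvALoop given_list 0 = (given_list.length : Int) - 1 then true else false

-- ===== PORT B =====
-- the for-loop of Source B over reversed(given_list[:-1]) with break at the first non-1
def pvBRun : List Int → Nat
  | [] => 0
  | x :: t => if x ≠ 1 then 0 else pvBRun t + 1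

def EndsWith1Bit_alt (given_list : List Int) : Bool :=
  if given_list = [] then false
  else decide (pvBRun given_list.dropLast.reverse % 2 = 0)

-- ===== PRECONDITION & SPEC =====
def Spec_EndsWith1Bit (given_list : List Int) (out : Bool) : Prop := out = EndsWith1Bit_alt given_list
instance (given_list : List Int) (out : Bool) : Decidable (Spec_EndsWith1Bit given_list out) := by unfold Spec_EndsWith1Bit; infer_instance

-- ===== CLAIM (what is proved, stated in full; the proofs are below) =====
def Claim_equal_EndsWith1Bit : Prop := ∀ (given_list : List Int), Dom_EndsWith1Bit given_list → Spec_EndsWith1Bit given_list (EndsWith1Bit given_list)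

-- ===== LEMMAS AND PROOFS =====

-- relative advance of A's parse over a suffix
def gAdv : List Int → Nat
  | [] => 0
  | [_] => 0
  | a :: b :: t => if a = 1 then 2 + gAdv t else 1 + gAdv (b :: t)

theorem loop_eq_gAdv (xs : List Int) (i : Int) (h0 : 0 ≤ i) :
    pvALoop xs i = i + gAdv (xs.drop i.toNat) := by
  rw [pvALoop]
  split
  · rename_i hle
    have hlt : i.toNat + 2 ≤ xs.length := by omega
    obtain ⟨a, b, t, hd⟩ : ∃ a b t, xs.drop i.toNat = a :: b :: t := by
      have hlen : 2 ≤ (xs.drop i.toNat).length := by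
        rw [List.length_drop]; omega
      rcases hx : xs.drop i.toNat with _ | ⟨a, _ | ⟨b, t⟩⟩
      · rw [hx] at hlen; simp at hlen
      · rw [hx] at hlen; simp at hlen
      · exact ⟨a, b, t, rfl⟩
    have hget : PySem.List.pyGet? xs i = some a := by
      rw [PySem.List.pyGet?_of_nonneg xs h0, ← List.head?_drop, hd]; rfl
    have hd1 : xs.drop (i + 1).toNat = b :: t := by
      have h1 : xs.drop (i.toNat + 1) = b :: t := by
        have := congrArg (List.drop 1) hd
        simpa [List.drop_drop, Nat.add_comm] using this
      simpa [show (i + 1).toNat = i.toNat + 1 by omega] using h1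
    have hd2 : xs.drop (i + 2).toNat = t := by
      have h2 : xs.drop (i.toNat + 2) = t := by
        have := congrArg (List.drop 2) hd
        simpa [List.drop_drop, Nat.add_comm] using this
      simpa [show (i + 2).toNat = i.toNat + 2 by omega] using h2
    rw [hget]
    simp only [Option.getD_some]
    split
    · rename_i ha
      rw [loop_eq_gAdv xs (i + 2) (by omega), hd2, hd, gAdv, if_pos ha]
      push_cast; ring
    · rename_i ha
      rw [loop_eq_gAdv xs (i + 1) (by omega), hd1, hd, gAdv, if_neg ha]
      push_cast; ring
  · rename_i hgt
    have : (xs.drop i.toNat).length ≤ 1 := by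
      have := xs.length_drop (i := i.toNat); omega
    rcases hx : xs.drop i.toNat with _ | ⟨a, _ | ⟨b, t⟩⟩
    · simp [gAdv]
    · simp [gAdv]
    · rw [hx] at this; simp at this
termination_by ((xs.length : Int) - i).toNat
decreasing_by all_goals omega

theorem run_append_ne (l : List Int) (a : Int) (h : a ≠ 1) :
    pvBRun (l ++ [a]) = pvBRun l := by
  induction l with
  | nil => simp [pvBRun, h]
  | cons x l ih =>
    by_cases hx : x = 1 <;> simp [pvBRun, hx, ih]

theorem run_append_pair (l : List Int) (b : Int) :
    pvBRun (l ++ [b, 1]) % 2 = pvBRun l % 2 := by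
  induction l with
  | nil =>
    by_cases hb : b = 1 <;> simp [pvBRun, hb]
  | cons x l ih =>
    by_cases hx : x = 1
    · simp only [List.cons_append, pvBRun, hx]
      simp only [if_neg (by simp : ¬ (1:Int) ≠ 1)]
      omega
    · simp [pvBRun, hx]

theorem gAdv_iff_run (s : List Int) :
    (if (gAdv s : Int) = (s.length : Int) - 1 then true else false) = EndsWith1Bit_alt s := by
  induction s using gAdv.induct with
  | case1 => simp [gAdv, EndsWith1Bit_alt]
  | case2 a => simp [gAdv, EndsWith1Bit_alt, pvBRun]
  | case3 b t ih =>
    rcases t with _ | ⟨c, u⟩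
    · by_cases hb : b = 1 <;>
        simp [gAdv, EndsWith1Bit_alt, pvBRun, hb]
    · have hlhs : ((gAdv (1 :: b :: c :: u) : Int) = ((1 :: b :: c :: u).length : Int) - 1)
          ↔ ((gAdv (c :: u) : Int) = ((c :: u).length : Int) - 1) := by
        simp only [gAdv, List.length_cons]; push_cast; omega
      have hrev : (1 :: b :: c :: u).dropLast.reverse
          = (c :: u).dropLast.reverse ++ [b, 1] := by
        simp [List.dropLast_cons_of_ne_nil]
      rw [show (if (gAdv (1 :: b :: c :: u) : Int) = ((1 :: b :: c :: u).length : Int) - 1 then true else false)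
            = (if (gAdv (c :: u) : Int) = ((c :: u).length : Int) - 1 then true else false) from by
        simp only [hlhs]]
      rw [ih]
      simp only [EndsWith1Bit_alt, if_neg (by simp : ¬ (1 :: b :: c :: u) = ([] : List Int)),
        if_neg (by simp : ¬ (c :: u) = ([] : List Int)), hrev, run_append_pair]
  | case4 a b t ha ih =>
    have hlhs : ((gAdv (a :: b :: t) : Int) = ((a :: b :: t).length : Int) - 1)
        ↔ ((gAdv (b :: t) : Int) = ((b :: t).length : Int) - 1) := by
      simp only [gAdv, if_neg ha, List.length_cons]; push_cast; omega
    have hrev : (a :: b :: t).dropLast.reverse = (b :: t).dropLast.reverse ++ [a] := by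
      simp [List.dropLast_cons_of_ne_nil]
    rw [show (if (gAdv (a :: b :: t) : Int) = ((a :: b :: t).length : Int) - 1 then true else false)
          = (if (gAdv (b :: t) : Int) = ((b :: t).length : Int) - 1 then true else false) from by
      simp only [hlhs]]
    rw [ih]
    simp only [EndsWith1Bit_alt, if_neg (by simp : ¬ (a :: b :: t) = ([] : List Int)),
      if_neg (by simp : ¬ (b :: t) = ([] : List Int)), hrev, run_append_ne _ _ ha]

-- ===== VERDICT (by name: the statement is the Claim_ definition above) =====
theorem EndsWith1Bit_spec : Claim_equal_EndsWith1Bit := by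
  intro xs _
  unfold Spec_EndsWith1Bit EndsWith1Bit
  rw [loop_eq_gAdv xs 0 (by omega)]
  simpa using gAdv_iff_run xs
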